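-- pv_equiv track=rewrite | github.com/arvidarvidarvid/adventofcode | 2017/day06/day.py | reallocate
-- ===== SOURCE A (Python) =====
-- from copy import deepcopy
--
-- def reallocate(banks, break_for_banks=False):
--
--     previous_banks = []
--     rounds = 0
--     initial_banks = deepcopy(banks)
--
--     while True:
--
--         # One round of reallocation
--         max_val = max(banks)
--         max_index = banks.index(max_val)
--         to_distribute = banks[max_index]
--         banks[max_index] = 0
--         update_index = max_index + 1
--         while to_distribute > 0:
--             banks[update_index % (len(banks))] += 1
--             update_index += 1
--             to_distribute -= 1
--         rounds += 1
--
--         # Memoize and check for exit condiitions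
--         if break_for_banks and banks == initial_banks:
--             return rounds, banks
--         elif banks not in previous_banks:
--             previous_banks.append(deepcopy(banks))
--         else:
--             return rounds, banks
-- ===== SOURCE B (Python) =====
-- def reallocate(banks, break_for_banks=False):
--     # Mutates banks in place, like the original.
--     n = len(banks)
--     initial_banks = list(banks)
--     seen = set()
--     rounds = 0
--     while True:
--         max_val = max(banks)
--         max_index = banks.index(max_val)
--         banks[max_index] = 0
--         if max_val > 0:
--             base, rem = divmod(max_val, n)
--             for i in range(n):
--                 banks[i] += base
--             for k in range(1, rem + 1):
--                 banks[(max_index + k) % n] += 1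
--         rounds += 1
--         if break_for_banks and banks == initial_banks:
--             return rounds, banks
--         state = tuple(banks)
--         if state in seen:
--             return rounds, banks
--         seen.add(state)
-- ===== Notes on version B (the rewrite author's own statement) =====
-- stated objective: alternative
-- what changed: The token-by-token inner redistribution while-loop is replaced by a closed-form divmod update (zero the max bank, add base to every bank, +1 to the first rem offsets after it), and the list of previous states scanned each round is replaced by a set of seen state tuples.
-- outside the precondition, e.g. on reallocate([], False): A raises ValueError, B raises ValueError
import Mathlib
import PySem

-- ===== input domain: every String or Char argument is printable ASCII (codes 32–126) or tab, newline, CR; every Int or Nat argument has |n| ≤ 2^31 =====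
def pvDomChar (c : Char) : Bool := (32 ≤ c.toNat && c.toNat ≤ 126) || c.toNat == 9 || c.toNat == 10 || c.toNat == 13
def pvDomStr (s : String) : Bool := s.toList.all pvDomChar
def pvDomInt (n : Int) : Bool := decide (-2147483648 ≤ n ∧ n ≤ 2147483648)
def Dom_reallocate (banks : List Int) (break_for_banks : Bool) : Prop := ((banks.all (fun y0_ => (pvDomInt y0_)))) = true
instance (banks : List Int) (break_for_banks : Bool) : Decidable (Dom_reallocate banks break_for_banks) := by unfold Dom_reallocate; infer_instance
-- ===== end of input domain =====

-- B replaces A's token-by-token inner redistribution loop with a closed-form divmod update and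
-- A's per-round scan of the list of previous states with a set; both Pythons mutate `banks` in
-- place (the equivalence proved here is about the return value, whose second component is that list).

-- `banks[j] += 1` for a non-negative in-range index j (A's inner while; B's remainder loop)
def pvBump (l : List Int) (j : Int) : List Int :=
  PySem.List.pySetD l j (PySem.List.pyGetD l j 0 + 1)

-- fuel for the two `while True:` loops: a pigeonhole bound on the number of rounds (every round
-- that continues records one fresh state, and all states stay inside a finite box), so it merely
-- totalizes the loops; it is shared by both ports and never exhausted where the Pythons return.
def pvFuel (banks : List Int) : Nat :=
  ((banks.foldl (fun a x => a + max x 0) 0) - (banks.foldl min 0) + 1).toNat ^ banks.length + 2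

-- ===== PORT A =====
-- inner `while to_distribute > 0:` loop of A
def pvDistribute (banks : List Int) (update_index : Int) (to_distribute : Int) : List Int :=
  if 0 < to_distribute then
    pvDistribute (pvBump banks (PySem.Int.mod update_index (banks.length : Int)))
      (update_index + 1) (to_distribute - 1)
  else banks
termination_by to_distribute.toNat
decreasing_by omega

-- `while True:` loop of A
def pvLoopA (fuel : Nat) (banks : List Int) (previous_banks : List (List Int)) (rounds : Int)
    (initial_banks : List Int) (break_for_banks : Bool) : Int × List Int :=
  match fuel with
  | 0 => (rounds, banks)
  | fuel + 1 =>
    match PySem.List.max? banks (fun y => y) with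
    | none => (rounds, banks)  -- max([]) raises ValueError in Python: excluded by Pre_
    | some max_val =>
      let max_index : Nat := (PySem.List.index? banks max_val).getD 0
      let to_distribute := PySem.List.pyGetD banks (max_index : Int) 0
      let banks := PySem.List.pySetD banks (max_index : Int) 0
      let banks := pvDistribute banks ((max_index : Int) + 1) to_distribute
      let rounds := rounds + 1
      if break_for_banks && (banks == initial_banks) then (rounds, banks)
      else if banks ∉ previous_banks then
        pvLoopA fuel banks (previous_banks ++ [banks]) rounds initial_banks break_for_banks
      else (rounds, banks)

def reallocate (banks : List Int) (break_for_banks : Bool) : Int × List Int :=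
  pvLoopA (pvFuel banks) banks [] 0 banks break_for_banks

-- ===== PORT B =====
-- `while True:` loop of B (closed-form divmod redistribution, set of seen states)
def pvLoopB (fuel : Nat) (banks : List Int) (seen : PySem.Set (List Int)) (rounds : Int)
    (initial_banks : List Int) (break_for_banks : Bool) : Int × List Int :=
  match fuel with
  | 0 => (rounds, banks)
  | fuel + 1 =>
    match PySem.List.max? banks (fun y => y) with
    | none => (rounds, banks)  -- max([]) raises ValueError in Python: excluded by Pre_
    | some max_val =>
      let n : Int := (banks.length : Int)
      let max_index : Nat := (PySem.List.index? banks max_val).getD 0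
      let banks := PySem.List.pySetD banks (max_index : Int) 0
      let banks :=
        if 0 < max_val then
          let base := PySem.Int.floordiv max_val n
          let rem := PySem.Int.mod max_val n
          let banks := (PySem.List.pyRange 0 n 1).foldl
            (fun acc i => PySem.List.pySetD acc i (PySem.List.pyGetD acc i 0 + base)) banks
          (PySem.List.pyRange 1 (rem + 1) 1).foldl
            (fun acc k => pvBump acc (PySem.Int.mod ((max_index : Int) + k) n)) banks
        else banks
      let rounds := rounds + 1
      if break_for_banks && (banks == initial_banks) then (rounds, banks)
      else if banks ∈ seen then (rounds, banks)
      else pvLoopB fuel banks (seen.add banks) rounds initial_banks break_for_banks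

def reallocate_alt (banks : List Int) (break_for_banks : Bool) : Int × List Int :=
  pvLoopB (pvFuel banks) banks PySem.Set.empty 0 banks break_for_banks

-- ===== PRECONDITION & SPEC =====
-- Pre_ excludes only the empty list, on which Python's max([]) raises ValueError.
def Pre_reallocate (banks : List Int) (break_for_banks : Bool) : Prop := banks ≠ []
instance (banks : List Int) (break_for_banks : Bool) : Decidable (Pre_reallocate banks break_for_banks) := by unfold Pre_reallocate; infer_instance

def pvWitness_reallocate : List Int × Bool := ([0, 2, 7, 0], false)

def Spec_reallocate (banks : List Int) (break_for_banks : Bool) (out : Int × List Int) : Prop := out = reallocate_alt banks break_for_banks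
instance (banks : List Int) (break_for_banks : Bool) (out : Int × List Int) : Decidable (Spec_reallocate banks break_for_banks out) := by unfold Spec_reallocate; infer_instance

-- ===== CLAIM (what is proved, stated in full; the proofs are below) =====
def Claim_equal_reallocate : Prop := ∀ (banks : List Int) (break_for_banks : Bool), Dom_reallocate banks break_for_banks → Pre_reallocate banks break_for_banks → Spec_reallocate banks break_for_banks (reallocate banks break_for_banks)

-- ===== LEMMAS AND PROOFS =====

theorem pvGetD_set_ne (l : List Int) (i j : Nat) (v : Int) (h : i ≠ j) :
    (l.set i v).getD j 0 = l.getD j 0 := by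
  rw [List.getD_eq_getElem?_getD, List.getD_eq_getElem?_getD, List.getElem?_set, if_neg h]

theorem pvBump_comm (l : List Int) (j1 j2 : Int) (h1 : 0 ≤ j1) (h2 : 0 ≤ j2) :
    pvBump (pvBump l j1) j2 = pvBump (pvBump l j2) j1 := by
  obtain ⟨i, rfl⟩ : ∃ i : Nat, j1 = (i : Int) := ⟨j1.toNat, (Int.toNat_of_nonneg h1).symm⟩
  obtain ⟨j, rfl⟩ : ∃ j : Nat, j2 = (j : Int) := ⟨j2.toNat, (Int.toNat_of_nonneg h2).symm⟩
  simp only [pvBump, PySem.List.pySetD_natCast, PySem.List.pyGetD_natCast]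
  by_cases hij : i = j
  · subst hij; rfl
  · rw [pvGetD_set_ne _ _ _ _ hij, pvGetD_set_ne _ _ _ _ (Ne.symm hij), List.set_comm _ _ hij]

theorem pvBump_length (l : List Int) (j : Int) : (pvBump l j).length = l.length := by
  simp [pvBump, PySem.List.length_pySetD]

-- A's inner loop is a left fold over the bumped indices (u+t) % n, t = 0..v-1
theorem pvDistribute_eq_foldl : ∀ (m : Nat) (v : Int), v ≤ (m : Int) → ∀ (l : List Int) (u : Int),
    pvDistribute l u v =
      (PySem.List.pyRange 0 v 1).foldl
        (fun acc t => pvBump acc (PySem.Int.mod (u + t) (l.length : Int))) l := by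
  intro m
  induction m with
  | zero =>
    intro v hv l u
    rw [pvDistribute, if_neg (by omega), PySem.List.pyRange_one_eq_nil (by omega), List.foldl_nil]
  | succ m ih =>
    intro v hv l u
    by_cases h : 0 < v
    case neg =>
      rw [pvDistribute, if_neg h, PySem.List.pyRange_one_eq_nil (by omega), List.foldl_nil]
    · rw [pvDistribute, if_pos h, PySem.List.pyRange_one_cons h]
      rw [List.foldl_cons]
      have hb : (pvBump l (PySem.Int.mod (u + 0) (l.length:Int))).length = l.length := pvBump_length _ _
      have h0 : PySem.Int.mod u (l.length:Int) = PySem.Int.mod (u + 0) (l.length:Int) := by ring_nf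
      rw [h0, ih (v-1) (by omega)]
      rw [hb]
      rw [PySem.List.pyRange_one, PySem.List.pyRange_one]
      rw [List.foldl_map, List.foldl_map]
      have : (v - 1 - 0).toNat = (v - 1).toNat := by omega
      rw [this]
      apply PySem.List.foldl_congr_mem'
      intro t ht acc
      congr 2
      push_cast
      ring

-- adding `base` at every index 0..len-1 is map (+ base)
theorem pvBasefold (base : Int) : ∀ (k : Nat) (l : List Int) (a : Nat), a + k = l.length →
    (PySem.List.pyRange (a : Int) (l.length : Int) 1).foldl
        (fun acc i => PySem.List.pySetD acc i (PySem.List.pyGetD acc i 0 + base)) l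
      = l.take a ++ (l.drop a).map (· + base) := by
  intro k
  induction k with
  | zero =>
    intro l a ha
    rw [PySem.List.pyRange_one_eq_nil (by omega), List.foldl_nil]
    have : a = l.length := by omega
    subst this
    simp
  | succ k ih =>
    intro l a ha
    have hal : a < l.length := by omega
    rw [PySem.List.pyRange_one_cons (by exact_mod_cast hal), List.foldl_cons]
    have hget : PySem.List.pyGetD l (a : Int) 0 = l[a] := by
      rw [PySem.List.pyGetD_natCast, List.getD_eq_getElem?_getD, List.getElem?_eq_getElem hal]
      rfl
    rw [PySem.List.pySetD_natCast, hget]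
    set l' := l.set a (l[a] + base) with hl'
    have hlen : l'.length = l.length := by simp [hl']
    have hstep : ((a : Int) + 1) = ((a + 1 : Nat) : Int) := by push_cast; ring
    rw [hstep, ← hlen, ih l' (a+1) (by omega)]
    have htake : l'.take (a+1) = l.take a ++ [l[a] + base] := by
      have h1 : l'[a]? = some (l[a] + base) := by
        rw [hl', List.getElem?_set, if_pos rfl, if_pos hal]
      have h2 : l'.take a = l.take a := by
        rw [hl', List.take_set, List.set_eq_of_length_le (by simp)]
      rw [List.take_add_one, h1, h2]
      rfl
    have hdrop : l'.drop (a+1) = l.drop (a+1) := by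
      rw [hl', List.drop_set, if_pos (by omega)]
    rw [htake, hdrop, List.append_assoc]
    congr 1
    rw [List.drop_eq_getElem_cons hal, List.map_cons, List.singleton_append]

-- n consecutive residues mod n are a permutation of 0..n-1
theorem pvIdxPerm (n : Nat) (hn : 0 < n) (u : Int) :
    ((PySem.List.pyRange 0 (n : Int) 1).map (fun t => (u + t) % (n : Int))).Perm
      (PySem.List.pyRange 0 (n : Int) 1) := by
  have hnz : (n : Int) ≠ 0 := by exact_mod_cast hn.ne'
  have hnpos : (0 : Int) < (n : Int) := by exact_mod_cast hn
  have hnd : ((PySem.List.pyRange 0 (n : Int) 1).map (fun t => (u + t) % (n : Int))).Nodup := by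
    refine (PySem.List.nodup_pyRange_one 0 (n : Int)).map_on ?_
    intro t1 h1 t2 h2 heq
    rw [PySem.List.mem_pyRange_one] at h1 h2
    have hd : (n : Int) ∣ (t1 - t2) := by
      have h3 : ((u + t1) - (u + t2)) % (n : Int) = 0 := by
        rw [Int.sub_emod, heq, sub_self, Int.zero_emod]
      have h4 : (u + t1) - (u + t2) = t1 - t2 := by ring
      exact Int.dvd_of_emod_eq_zero (h4 ▸ h3)
    have habs : |t1 - t2| < (n : Int) := abs_sub_lt_iff.mpr ⟨by omega, by omega⟩
    have : t1 - t2 = 0 := Int.eq_zero_of_abs_lt_dvd hd habs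
    omega
  have hsub : ∀ x ∈ (PySem.List.pyRange 0 (n : Int) 1).map (fun t => (u + t) % (n : Int)),
      x ∈ PySem.List.pyRange 0 (n : Int) 1 := by
    intro x hx
    obtain ⟨t, _, rfl⟩ := List.mem_map.mp hx
    rw [PySem.List.mem_pyRange_one]
    exact ⟨Int.emod_nonneg _ hnz, Int.emod_lt_of_pos _ hnpos⟩
  refine (hnd.subperm hsub).perm_of_length_le ?_
  simp

-- one full cycle of bumps adds one everywhere
theorem pvCycle (l : List Int) (u : Int) (hn : 0 < l.length) :
    (PySem.List.pyRange 0 (l.length : Int) 1).foldl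
        (fun acc t => pvBump acc ((u + t) % (l.length : Int))) l
      = l.map (· + 1) := by
  have hnz : ((l.length : Int)) ≠ 0 := by exact_mod_cast hn.ne'
  rw [← List.foldl_map (f := fun t => (u + t) % (l.length : Int)) (g := pvBump)]
  rw [(pvIdxPerm l.length hn u).foldl_eq' ?comm l]
  case comm =>
    intro x hx y hy z
    obtain ⟨t1, _, rfl⟩ := List.mem_map.mp hx
    obtain ⟨t2, _, rfl⟩ := List.mem_map.mp hy
    exact pvBump_comm z _ _ (Int.emod_nonneg _ hnz) (Int.emod_nonneg _ hnz)
  have := pvBasefold 1 l.length l 0 (by omega)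
  simpa [pvBump] using this

-- peeling q full cycles off the bump fold
theorem pvDecomp : ∀ (q : Nat) (r : Int) (l : List Int) (u : Int), 0 < l.length → 0 ≤ r →
    (PySem.List.pyRange 0 ((q : Int) * (l.length : Int) + r) 1).foldl
        (fun acc t => pvBump acc ((u + t) % (l.length : Int))) l
      = (PySem.List.pyRange 0 r 1).foldl
          (fun acc t => pvBump acc ((u + t) % (l.length : Int))) (l.map (· + (q : Int))) := by
  intro q
  induction q with
  | zero =>
    intro r l u hn hr
    simp
  | succ q ih =>
    intro r l u hn hr
    have hnpos : (0 : Int) < (l.length : Int) := by exact_mod_cast hn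
    have hw : (0:Int) ≤ (q:Int) * (l.length:Int) + r := by positivity
    have hsplit : ((q+1 : Nat) : Int) * (l.length:Int) + r = (l.length:Int) + ((q:Int) * (l.length:Int) + r) := by push_cast; ring
    rw [hsplit, PySem.List.pyRange_one_append 0 (l.length:Int) ((l.length:Int) + ((q:Int) * (l.length:Int) + r)) (by omega) (by omega),
      List.foldl_append, pvCycle l u hn]
    have hre : (PySem.List.pyRange (l.length:Int) ((l.length:Int) + ((q:Int) * (l.length:Int) + r)) 1).foldl
        (fun acc t => pvBump acc ((u + t) % (l.length:Int))) (l.map (· + 1))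
        = (PySem.List.pyRange 0 ((q:Int) * (l.length:Int) + r) 1).foldl
        (fun acc t => pvBump acc ((u + t) % (l.length:Int))) (l.map (· + 1)) := by
      rw [PySem.List.pyRange_one (l.length:Int), PySem.List.pyRange_one 0, List.foldl_map, List.foldl_map]
      have h1 : ((l.length:Int) + ((q:Int) * (l.length:Int) + r) - (l.length:Int)).toNat = ((q:Int) * (l.length:Int) + r - 0).toNat := by omega
      rw [h1]
      apply PySem.List.foldl_congr_mem'
      intro k hk acc
      have h3 : u + ((l.length:Int) + (k:Int)) = (u + (0 + (k:Int))) + (l.length:Int) := by ring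
      rw [h3]
      have h2 : (u + (0 + (k:Int)) + (l.length:Int)) % (l.length:Int) = (u + (0 + (k:Int))) % (l.length:Int) := by
        have := Int.add_mul_emod_self_left (a := u + (0 + (k:Int))) (b := (l.length:Int)) (c := 1)
        simpa using this
      rw [h2]
    rw [hre]
    have hlen : (l.map (· + (1:Int))).length = l.length := by simp
    have hih := ih r (l.map (· + 1)) u (by simpa using hn) hr
    rw [hlen] at hih
    rw [hih, List.map_map]
    congr 1
    apply List.map_congr_left
    intro x _
    simp only [Function.comp_apply]
    push_cast
    ring

-- the two round bodies compute the same redistributed list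
theorem pvStep_eq (l : List Int) (mi : Nat) (v : Int) (hlen : 0 < l.length) :
    pvDistribute l ((mi : Int) + 1) v =
      (if 0 < v then
        (PySem.List.pyRange 1 (PySem.Int.mod v (l.length : Int) + 1) 1).foldl
          (fun acc k => pvBump acc (PySem.Int.mod ((mi : Int) + k) (l.length : Int)))
          ((PySem.List.pyRange 0 (l.length : Int) 1).foldl
            (fun acc i => PySem.List.pySetD acc i
              (PySem.List.pyGetD acc i 0 + PySem.Int.floordiv v (l.length : Int))) l)
      else l) := by
  have hnpos : (0 : Int) < (l.length : Int) := by exact_mod_cast hlen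
  by_cases h : 0 < v
  case neg => rw [if_neg h, pvDistribute, if_neg h]
  rw [if_pos h]
  rw [pvDistribute_eq_foldl v.toNat v (by omega)]
  have hmodfix : ∀ (init : List Int) (a b : Int),
      (PySem.List.pyRange a b 1).foldl
        (fun acc t => pvBump acc (PySem.Int.mod (((mi:Int)+1) + t) (l.length : Int))) init
      = (PySem.List.pyRange a b 1).foldl
        (fun acc t => pvBump acc ((((mi:Int)+1) + t) % (l.length : Int))) init := by
    intro init a b
    apply PySem.List.foldl_congr_mem'
    intro t _ acc
    rw [PySem.Int.mod_eq_emod_of_pos hnpos]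
  rw [hmodfix]
  have hqnn : 0 ≤ v / (l.length : Int) := Int.ediv_nonneg (by omega) (by omega)
  set q : Nat := (v / (l.length : Int)).toNat with hq
  have hqc : ((q : Nat) : Int) = v / (l.length : Int) := Int.toNat_of_nonneg hqnn
  have hsplitv : v = (q : Int) * (l.length : Int) + v % (l.length : Int) := by
    rw [hqc]
    have := Int.ediv_add_emod v (l.length : Int)
    linarith [mul_comm ((l.length : Int)) (v / (l.length : Int))]
  rw [show PySem.List.pyRange 0 v 1 = PySem.List.pyRange 0 ((q : Int) * (l.length : Int) + v % (l.length : Int)) 1 from by rw [← hsplitv]]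
  rw [pvDecomp q (v % (l.length : Int)) l ((mi:Int)+1) hlen (Int.emod_nonneg _ (by omega))]
  have hbase : (PySem.List.pyRange 0 (l.length : Int) 1).foldl
      (fun acc i => PySem.List.pySetD acc i
        (PySem.List.pyGetD acc i 0 + PySem.Int.floordiv v (l.length : Int))) l
      = l.map (· + (q : Int)) := by
    have h0 : PySem.Int.floordiv v (l.length : Int) = (q : Int) := by
      rw [PySem.Int.floordiv_eq_ediv_of_pos hnpos, hqc]
    rw [h0]
    have := pvBasefold (q : Int) l.length l 0 (by omega)
    simpa using this
  rw [hbase]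
  rw [PySem.Int.mod_eq_emod_of_pos hnpos]
  rw [PySem.List.pyRange_one 1, PySem.List.pyRange_one 0, List.foldl_map, List.foldl_map]
  rw [show (v % (l.length : Int) + 1 - 1).toNat = (v % (l.length : Int) - 0).toNat from by omega]
  apply PySem.List.foldl_congr_mem'
  intro k _ acc
  rw [PySem.Int.mod_eq_emod_of_pos hnpos]
  congr 2
  push_cast
  ring

theorem pvLoop_eq : ∀ (fuel : Nat) (banks : List Int) (prev : List (List Int)) (rounds : Int)
    (initial : List Int) (bfb : Bool),
    pvLoopA fuel banks prev rounds initial bfb = pvLoopB fuel banks prev rounds initial bfb := by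
  intro fuel
  induction fuel with
  | zero => intro banks prev rounds initial bfb; rfl
  | succ fuel ih =>
    intro banks prev rounds initial bfb
    rw [pvLoopA, pvLoopB]
    cases hmax : PySem.List.max? banks (fun y => y) with
    | none => rfl
    | some max_val =>
      have hlen : 0 < banks.length :=
        List.length_pos_iff.mpr (List.ne_nil_of_mem (PySem.List.max?_mem hmax))
      dsimp only
      set mi : Nat := (PySem.List.index? banks max_val).getD 0 with hmi
      have hmem : max_val ∈ banks := PySem.List.max?_mem hmax
      obtain ⟨k, hk⟩ := Option.isSome_iff_exists.mp ((PySem.List.index?_isSome_iff _ _).mpr hmem)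
      obtain ⟨hklt, hkget, -⟩ := PySem.List.getElem_of_index?_eq_some hk
      have hmik : mi = k := by rw [hmi, hk]; rfl
      have htd : PySem.List.pyGetD banks (mi : Int) 0 = max_val := by
        rw [PySem.List.pyGetD_natCast, hmik, List.getD_eq_getElem?_getD,
          List.getElem?_eq_getElem hklt, Option.getD_some, hkget]
      rw [htd]
      have hlen1 : (PySem.List.pySetD banks (mi : Int) 0).length = banks.length := PySem.List.length_pySetD _ _ _
      have hstep := pvStep_eq (PySem.List.pySetD banks (mi : Int) 0) mi max_val (by omega)
      rw [hlen1] at hstep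
      rw [hstep]
      set banks2 := (if 0 < max_val then _ else _)
      by_cases hbr : (bfb && (banks2 == initial)) = true
      · rw [if_pos hbr, if_pos hbr]
      · rw [if_neg hbr, if_neg hbr]
        by_cases hmem2 : banks2 ∈ prev
        · rw [if_neg (by simpa using hmem2), if_pos hmem2]
        · rw [if_pos (by simpa using hmem2), if_neg hmem2]
          have hadd : PySem.Set.add prev banks2 = prev ++ [banks2] := by
            simp [PySem.Set.add, hmem2]
          rw [hadd]
          exact ih _ _ _ _ _

-- ===== VERDICT (by name: the statement is the Claim_ definition above) =====
theorem reallocate_spec : Claim_equal_reallocate := by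
  intro banks bfb _ _
  unfold Spec_reallocate reallocate reallocate_alt
  exact pvLoop_eq _ _ _ _ _ _
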